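-- pv_equiv track=rewrite | github.com/neerjathakkar/Distinguishing-TCR-Groups | cluster_CDRs.py | clusters_to_dict
-- ===== SOURCE A (Python) =====
-- def clusters_to_dict(cluster_arr, Xlabels):
--     clusters = {}
--     for i in range(len(cluster_arr)):
--         if cluster_arr[i] in clusters:
--             clusters[cluster_arr[i]].append(Xlabels[i])
--         else:
--             clusters[cluster_arr[i]] = [Xlabels[i]]
--     return clusters
-- ===== SOURCE B (Python) =====
-- def clusters_to_dict(cluster_arr, Xlabels):
--     pairs = list(zip(cluster_arr, Xlabels))
--     result = {}
--     for key in dict.fromkeys(c for c, _ in pairs):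
--         result[key] = [lab for c, lab in pairs if c == key]
--     return result
-- ===== Notes on version B (the rewrite author's own statement) =====
-- stated objective: alternative
-- what changed: Replaces the single-pass dict accumulation (membership test + append/insert per index) by a two-phase scheme: zip the two lists, dedup the cluster ids in first-occurrence order, then build each cluster's label list by one filtering pass per distinct id.
import Mathlib
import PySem

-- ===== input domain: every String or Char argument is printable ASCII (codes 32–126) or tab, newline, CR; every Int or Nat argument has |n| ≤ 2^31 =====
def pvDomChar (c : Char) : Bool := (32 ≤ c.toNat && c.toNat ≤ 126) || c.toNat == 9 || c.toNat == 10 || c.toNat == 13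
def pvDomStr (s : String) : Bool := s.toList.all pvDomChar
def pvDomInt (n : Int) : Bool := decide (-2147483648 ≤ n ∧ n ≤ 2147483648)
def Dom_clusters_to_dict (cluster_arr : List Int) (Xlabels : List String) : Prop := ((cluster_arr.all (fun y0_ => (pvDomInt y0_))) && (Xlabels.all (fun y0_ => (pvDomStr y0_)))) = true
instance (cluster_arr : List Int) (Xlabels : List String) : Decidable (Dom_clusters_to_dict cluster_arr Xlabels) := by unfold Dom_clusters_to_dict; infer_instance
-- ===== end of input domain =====

-- B groups by first deduplicating the cluster ids and then filtering the zipped pairs per id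
-- (a different decomposition, similar cost); equivalence is about the returned dict only.

-- ===== PORT A =====
-- one pass over the indices, membership test + append-or-insert on an accumulating dict
def clusters_to_dict (cluster_arr : List Int) (Xlabels : List String) : List (Int × List String) :=
  ((PySem.List.pyRange 0 (PySem.List.len cluster_arr)).foldl
    (fun clusters i =>
      if clusters.contains (PySem.List.pyGetD cluster_arr i 0) then
        -- clusters[cluster_arr[i]].append(Xlabels[i]) : in-range under Pre_, default never read
        clusters.modify (PySem.List.pyGetD cluster_arr i 0) []
          (fun ls => ls ++ [PySem.List.pyGetD Xlabels i ""])
      else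
        clusters.insert (PySem.List.pyGetD cluster_arr i 0) [PySem.List.pyGetD Xlabels i ""])
    PySem.Dict.empty).items

-- ===== PORT B =====
def clusters_to_dict_alt (cluster_arr : List Int) (Xlabels : List String) : List (Int × List String) :=
  let pairs := cluster_arr.zip Xlabels
  (((PySem.List.dedup (pairs.map (fun p => p.1))).foldl
    (fun result key =>
      result.insert key ((pairs.filter (fun p => p.1 == key)).map (fun p => p.2)))
    PySem.Dict.empty)).items

-- ===== PRECONDITION & SPEC =====
-- A indexes Xlabels[i] for every i < len(cluster_arr): it raises IndexError when Xlabels is shorter.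
def Pre_clusters_to_dict (cluster_arr : List Int) (Xlabels : List String) : Prop :=
  cluster_arr.length ≤ Xlabels.length
instance (cluster_arr : List Int) (Xlabels : List String) : Decidable (Pre_clusters_to_dict cluster_arr Xlabels) := by unfold Pre_clusters_to_dict; infer_instance
def pvWitness_clusters_to_dict : List Int × List String := ([1, 2, 1, 3], ["a", "b", "c", "d"])

def Spec_clusters_to_dict (cluster_arr : List Int) (Xlabels : List String) (out : List (Int × List String)) : Prop := out = clusters_to_dict_alt cluster_arr Xlabels
instance (cluster_arr : List Int) (Xlabels : List String) (out : List (Int × List String)) : Decidable (Spec_clusters_to_dict cluster_arr Xlabels out) := by unfold Spec_clusters_to_dict; infer_instance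

-- ===== CLAIM (what is proved, stated in full; the proofs are below) =====
def Claim_equal_clusters_to_dict : Prop := ∀ (cluster_arr : List Int) (Xlabels : List String), Dom_clusters_to_dict cluster_arr Xlabels → Pre_clusters_to_dict cluster_arr Xlabels → Spec_clusters_to_dict cluster_arr Xlabels (clusters_to_dict cluster_arr Xlabels)

-- ===== LEMMAS AND PROOFS =====

-- A's branching step is exactly Dict.modify with default []
lemma step_eq_modify (d : PySem.Dict Int (List String)) (c : Int) (x : String) :
    (if d.contains c then d.modify c [] (fun ls => ls ++ [x]) else d.insert c [x])
      = d.modify c [] (fun ls => ls ++ [x]) := by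
  by_cases hc : d.contains c
  · simp [hc]
  · simp only [Bool.not_eq_true] at hc
    simp [hc, PySem.Dict.modify, PySem.Dict.getD_of_not_contains d [] hc]

-- under Pre_, A's index loop is a fold over the zipped pairs
lemma A_eq_pairs_fold (cluster_arr : List Int) (Xlabels : List String)
    (h : cluster_arr.length ≤ Xlabels.length) :
    clusters_to_dict cluster_arr Xlabels =
      ((cluster_arr.zip Xlabels).foldl
        (fun d p => d.modify p.1 [] (fun ls => ls ++ [p.2])) PySem.Dict.empty).items := by
  unfold clusters_to_dict
  have hlen : PySem.List.len cluster_arr = PySem.List.len (cluster_arr.zip Xlabels) := by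
    simp [PySem.List.len, List.length_zip]; omega
  rw [hlen]
  congr 1
  have hstep : ∀ (d : PySem.Dict Int (List String)) (i : Int),
      i ∈ PySem.List.pyRange 0 (PySem.List.len (cluster_arr.zip Xlabels)) →
      (if d.contains (PySem.List.pyGetD cluster_arr i 0) then
        d.modify (PySem.List.pyGetD cluster_arr i 0) []
          (fun ls => ls ++ [PySem.List.pyGetD Xlabels i ""])
      else
        d.insert (PySem.List.pyGetD cluster_arr i 0) [PySem.List.pyGetD Xlabels i ""]) =
      (fun d p => d.modify p.1 [] (fun ls => ls ++ [p.2])) d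
        (PySem.List.pyGetD (cluster_arr.zip Xlabels) i (0, "")) := by
    intro d i hi
    have hi' := PySem.List.mem_pyRange_one.1 hi
    simp only [PySem.List.len] at hi'
    obtain ⟨h0, hlt⟩ := hi'
    have hnlt : i.toNat < (cluster_arr.zip Xlabels).length := by omega
    have hca : i.toNat < cluster_arr.length := by
      simp [List.length_zip] at hnlt; omega
    have hxl : i.toNat < Xlabels.length := by
      simp [List.length_zip] at hnlt; omega
    rw [step_eq_modify]
    have e1 : PySem.List.pyGetD cluster_arr i 0 = cluster_arr[i.toNat] :=
      PySem.List.pyGetD_eq_getElem cluster_arr 0 h0 (by omega)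
    have e2 : PySem.List.pyGetD Xlabels i "" = Xlabels[i.toNat] :=
      PySem.List.pyGetD_eq_getElem Xlabels "" h0 (by omega)
    have e3 : PySem.List.pyGetD (cluster_arr.zip Xlabels) i (0, "") =
        (cluster_arr.zip Xlabels)[i.toNat] :=
      PySem.List.pyGetD_eq_getElem _ (0, "") h0 (by omega)
    simp [e1, e2, e3, List.getElem_zip]
  rw [PySem.List.foldl_congr_mem _ _
        (fun acc j => (fun d p => d.modify p.1 [] (fun ls => ls ++ [p.2])) acc
          (PySem.List.pyGetD (cluster_arr.zip Xlabels) j (0, ""))) _ hstep]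
  exact (PySem.List.foldl_pyRange_pyGetD (cluster_arr.zip Xlabels) (0, "")
    (fun d p => d.modify p.1 [] (fun ls => ls ++ [p.2])) PySem.Dict.empty (le_refl 0)).trans
    (by rw [Int.toNat_zero, List.drop_zero])

theorem clusters_to_dict_spec : Claim_equal_clusters_to_dict := by
  intro cluster_arr Xlabels _ hpre
  unfold Spec_clusters_to_dict clusters_to_dict_alt
  rw [A_eq_pairs_fold cluster_arr Xlabels hpre]
  set pairs := cluster_arr.zip Xlabels with hp
  set dA := pairs.foldl (fun d p => d.modify p.1 [] (fun ls => ls ++ [p.2])) PySem.Dict.empty with hdA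
  -- A's dict: keys are the distinct cluster ids in first-occurrence order …
  have hkeys : dA.keys = PySem.Set.ofList (pairs.map (fun p => p.1)) := by
    rw [hdA, PySem.Dict.keys_foldl_modify_key pairs (fun p => p.1) []
      (fun _ p => (fun ls => ls ++ [p.2]))]
    simp [PySem.Set.update_nil_left]
  have hnd : dA.keys.Nodup := by rw [hkeys]; exact PySem.Set.nodup_ofList _
  -- … and each key maps to the labels of its matching pairs
  have hval : ∀ k : Int, dA.getD k [] = (pairs.filter (fun p => p.1 == k)).map (fun p => p.2) := by
    intro k
    rw [hdA, PySem.Dict.getD_foldl_modify_append pairs PySem.Dict.empty k]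
    simp
  rw [PySem.Dict.items_eq_map_keys dA hnd [], hkeys]
  -- B's dict: fresh distinct keys inserted into an empty dict append in order
  rw [PySem.Dict.items_foldl_insert_fresh
      (PySem.List.dedup (pairs.map (fun p => p.1))) (fun k => k)
      (fun key => (pairs.filter (fun p => p.1 == key)).map (fun p => p.2))
      PySem.Dict.empty (by intro a _; simp)
      (by simp only [List.map_id_fun', id]
          exact PySem.Set.nodup_ofList (pairs.map (fun p => p.1)))]
  simp only [PySem.List.dedup, hval]
  rfl
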